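-- pv_equiv track=rewrite | github.com/AadiD123/boiler-bites | webscraping/api_test.py | has_pig
-- ===== SOURCE A (Python) =====
-- def has_pig(ingredients_string):
--     pig_keywords = ['pork', 'bacon', 'ham', 'sausage', 'lard', 'guanciale', 'pork belly', 'pig', 'hog', 'swine']
--
--     ingredients_list = ingredients_string.split(', ')
--
--     for ingredient in ingredients_list:
--         ingredient_lower = ingredient.strip().lower()
--         for keyword in pig_keywords:
--             if keyword in ingredient_lower:
--                 return True
--
--     return False
-- ===== SOURCE B (Python) =====
-- def has_pig(ingredients_string):
--     pig_keywords = ['pork', 'bacon', 'ham', 'sausage', 'lard', 'guanciale', 'pork belly', 'pig', 'hog', 'swine']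
--     s = ingredients_string.lower()
--     return any(keyword in s for keyword in pig_keywords)
-- ===== Notes on version B (the rewrite author's own statement) =====
-- stated objective: simpler
-- what changed: B deletes A's per-token split/strip loop entirely: it lowercases the whole string once and returns any() of ten substring tests over the full string, which is equivalent because no keyword contains the separator comma or leading/trailing whitespace.
import Mathlib
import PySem

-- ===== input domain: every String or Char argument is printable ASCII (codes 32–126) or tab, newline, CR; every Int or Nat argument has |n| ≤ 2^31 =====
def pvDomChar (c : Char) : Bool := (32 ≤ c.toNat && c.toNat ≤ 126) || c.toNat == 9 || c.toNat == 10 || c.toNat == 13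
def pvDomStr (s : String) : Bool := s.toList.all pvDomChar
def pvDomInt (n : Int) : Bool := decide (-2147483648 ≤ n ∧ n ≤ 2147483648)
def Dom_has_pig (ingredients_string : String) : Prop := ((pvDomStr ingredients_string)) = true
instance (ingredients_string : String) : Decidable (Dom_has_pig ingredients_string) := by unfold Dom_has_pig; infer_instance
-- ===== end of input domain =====

-- B drops A's per-token split/strip loop: it lowercases the whole string once and runs a single
-- any() of substring tests over it (equivalent because no keyword contains the separator comma or edge whitespace).

def pigKeywords : List (List Char) :=
  ["pork".toList, "bacon".toList, "ham".toList, "sausage".toList, "lard".toList,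
   "guanciale".toList, "pork belly".toList, "pig".toList, "hog".toList, "swine".toList]

-- ===== PORT A =====
def has_pig (ingredients_string : String) : Bool :=
  (PySem.Chars.splitOn ingredients_string.toList [',', ' ']).any (fun ing =>
    pigKeywords.any (fun kw => PySem.Chars.isIn kw (PySem.Chars.lower (PySem.Chars.strip ing))))

-- ===== PORT B =====
def has_pig_alt (ingredients_string : String) : Bool :=
  let s := PySem.Chars.lower ingredients_string.toList
  pigKeywords.any (fun kw => PySem.Chars.isIn kw s)

-- ===== PRECONDITION & SPEC =====
def Spec_has_pig (ingredients_string : String) (out : Bool) : Prop := out = has_pig_alt ingredients_string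
instance (ingredients_string : String) (out : Bool) : Decidable (Spec_has_pig ingredients_string out) := by unfold Spec_has_pig; infer_instance

-- ===== CLAIM (what is proved, stated in full; the proofs are below) =====
def Claim_equal_has_pig : Prop := ∀ (ingredients_string : String), Dom_has_pig ingredients_string → Spec_has_pig ingredients_string (has_pig ingredients_string)

-- ===== LEMMAS AND PROOFS =====

-- structural model of Python's split(', ') (proof helper)
def mySplit (pre : List Char) : List Char → List (List Char)
  | ',' :: ' ' :: rest => pre :: mySplit [] rest
  | c :: rest => mySplit (pre ++ [c]) rest
  | [] => [pre]

def chk (p : List Char) : Bool :=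
  pigKeywords.any (fun kw => PySem.Chars.isIn kw (PySem.Chars.lower (PySem.Chars.strip p)))

def chkW (l : List Char) : Bool :=
  pigKeywords.any (fun kw => PySem.Chars.isIn kw (PySem.Chars.lower l))

lemma mySplit_push (pre : List Char) (c : Char) (rest : List Char)
    (h : ¬ ([',', ' '] : List Char) <+: (c :: rest)) :
    mySplit pre (c :: rest) = mySplit (pre ++ [c]) rest := by
  rw [mySplit.eq_def]
  split
  · rename_i r heq
    exact absurd ⟨r, heq.symm⟩ h
  · rename_i c' r heq
    cases heq
    rfl
  · rename_i heq
    cases heq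

lemma go_spec : ∀ (fuel : Nat) (l cur : List Char) (acc : List (List Char)), l.length < fuel →
    PySem.Chars.splitOn.go [',', ' '] fuel l cur acc = acc.reverse ++ mySplit cur.reverse l := by
  intro fuel
  induction fuel with
  | zero => intro l cur acc h; omega
  | succ fuel ih =>
    intro l cur acc h
    match l with
    | [] => simp [PySem.Chars.splitOn.go, mySplit]
    | c :: rest =>
      rw [show PySem.Chars.splitOn.go [',', ' '] (fuel+1) (c :: rest) cur acc =
        if ([',', ' '] : List Char).isPrefixOf (c :: rest) then
          PySem.Chars.splitOn.go [',', ' '] fuel (List.drop 2 (c :: rest)) [] (cur.reverse :: acc)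
        else PySem.Chars.splitOn.go [',', ' '] fuel rest (c :: cur) acc from by
          simp [PySem.Chars.splitOn.go]]
      by_cases hp : ([',', ' '] : List Char) <+: (c :: rest)
      · rw [if_pos (List.isPrefixOf_iff_prefix.mpr hp)]
        obtain ⟨t, ht⟩ := hp
        cases ht
        show PySem.Chars.splitOn.go [',', ' '] fuel (List.drop 2 (',' :: ' ' :: t)) []
            (cur.reverse :: acc) = acc.reverse ++ mySplit cur.reverse (',' :: ' ' :: t)
        simp only [List.drop_succ_cons, List.drop_zero]
        rw [ih t [] (cur.reverse :: acc) (by simp at h ⊢; omega)]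
        simp [mySplit]
      · rw [if_neg (by simpa [List.isPrefixOf_iff_prefix] using hp)]
        rw [ih rest (c :: cur) acc (by simp at h ⊢; omega)]
        rw [mySplit_push _ _ _ hp]
        simp

lemma splitOn_eq (l : List Char) : PySem.Chars.splitOn l [',', ' '] = mySplit [] l := by
  unfold PySem.Chars.splitOn
  rw [go_spec (l.length + 1) l [] [] (by omega)]
  rfl

-- a prefix containing no ',' cannot reach past an inserted ','
lemma prefix_append_comma (kw x y : List Char) (hc : ',' ∉ kw) :
    kw <+: x ++ ',' :: y ↔ kw <+: x := by
  induction x generalizing kw with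
  | nil =>
    simp only [List.nil_append]
    constructor
    · intro h
      match kw, h with
      | [], _ => exact List.nil_prefix
      | k :: kr, h =>
        rw [List.cons_prefix_cons] at h
        exact absurd (h.1 ▸ List.mem_cons_self) hc
    · intro h
      simp [List.prefix_nil.mp h]
  | cons a x' ih =>
    match kw with
    | [] => simp
    | k :: kr =>
      simp only [List.cons_append, List.cons_prefix_cons]
      exact and_congr_right fun _ => ih kr (fun hm => hc (List.mem_cons_of_mem _ hm))

-- an infix containing no ',' lies entirely on one side of an inserted ','
lemma infix_append_comma (kw a b : List Char) (hc : ',' ∉ kw) :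
    kw <:+: a ++ ',' :: b ↔ kw <:+: a ∨ kw <:+: b := by
  induction a with
  | nil =>
    simp only [List.nil_append, List.infix_cons_iff]
    rw [show (kw <+: ',' :: b) = (kw <+: [] ++ ',' :: b) from rfl,
      prefix_append_comma kw [] b hc]
    constructor
    · rintro (h | h)
      · exact Or.inl (List.prefix_nil.mp h ▸ List.nil_infix)
      · exact Or.inr h
    · rintro (h | h)
      · exact Or.inl ((List.infix_nil.mp h) ▸ List.nil_prefix)
      · exact Or.inr h
  | cons c a' ih =>
    rw [List.cons_append, List.infix_cons_iff, ih,
      show c :: (a' ++ ',' :: b) = (c :: a') ++ ',' :: b from rfl,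
      prefix_append_comma kw (c :: a') b hc, List.infix_cons_iff]
    tauto

-- all-space junk on the left is invisible to a keyword starting with a non-space
lemma infix_space_left (kw w b : List Char) (hw : ∀ c ∈ w, PySem.Chars.isspace c = true)
    (hk : ∀ c ∈ kw.head?, PySem.Chars.isspace c = false) :
    kw <:+: w ++ b ↔ kw <:+: b := by
  induction w with
  | nil => simp
  | cons c w' ih =>
    simp only [List.cons_append, List.infix_cons_iff]
    constructor
    · rintro (h | h)
      · match kw, h with
        | [], _ => exact List.nil_infix
        | k :: kr, h =>
          rw [List.cons_prefix_cons] at h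
          have := hk k (by simp)
          rw [h.1] at this
          rw [hw c List.mem_cons_self] at this
          cases this
      · exact (ih (fun d hd => hw d (List.mem_cons_of_mem _ hd))).mp h
    · intro h
      exact Or.inr ((ih (fun d hd => hw d (List.mem_cons_of_mem _ hd))).mpr h)

-- all-space junk on the right is invisible to a keyword ending with a non-space
lemma infix_space_right (kw b w : List Char) (hw : ∀ c ∈ w, PySem.Chars.isspace c = true)
    (hk : ∀ c ∈ kw.getLast?, PySem.Chars.isspace c = false) :
    kw <:+: b ++ w ↔ kw <:+: b := by
  rw [← List.reverse_infix (l₂ := b ++ w), ← List.reverse_infix (l₂ := b), List.reverse_append]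
  exact infix_space_left kw.reverse w.reverse b.reverse
    (fun c hc => hw c (List.mem_reverse.mp hc))
    (fun c hc => hk c (by rwa [List.head?_reverse] at hc))

set_option maxRecDepth 8192 in
lemma lowerChar_of_isspace (c : Char) (h : PySem.Chars.isspace c = true) :
    PySem.Chars.lowerChar c = c := by
  unfold PySem.Chars.lowerChar
  rw [if_neg]
  intro hu
  simp only [PySem.Chars.isupper, Bool.and_eq_true, decide_eq_true_eq, Char.le_def] at hu
  simp only [PySem.Chars.isspace, Bool.or_eq_true, Bool.and_eq_true, decide_eq_true_eq] at h
  have h1 : ('A' : Char).val.toNat = 65 := rfl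
  have h2 : ('Z' : Char).val.toNat = 90 := rfl
  obtain ⟨hu1, hu2⟩ := hu
  have hu1' : 65 ≤ c.toNat := by
    have t := UInt32.le_iff_toNat_le.mp hu1; rw [h1] at t; exact t
  have hu2' : c.toNat ≤ 90 := by
    have t := UInt32.le_iff_toNat_le.mp hu2; rw [h2] at t; exact t
  omega

lemma lower_of_allspace (w : List Char) (hw : ∀ c ∈ w, PySem.Chars.isspace c = true) :
    PySem.Chars.lower w = w := by
  unfold PySem.Chars.lower
  exact (List.map_congr_left (fun c hc => lowerChar_of_isspace c (hw c hc))).trans (List.map_id w)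

-- stripping is invisible to a keyword whose two ends are non-space
lemma infix_lower_strip (kw p : List Char)
    (hk : ∀ c ∈ kw.head?, PySem.Chars.isspace c = false)
    (hl : ∀ c ∈ kw.getLast?, PySem.Chars.isspace c = false) :
    kw <:+: PySem.Chars.lower (PySem.Chars.strip p) ↔ kw <:+: PySem.Chars.lower p := by
  have sp := PySem.Chars.isspace
  set q := PySem.Chars.lstrip p with hq
  have hp1 : p = List.takeWhile PySem.Chars.isspace p ++ q := by
    rw [hq]; unfold PySem.Chars.lstrip; rw [List.takeWhile_append_dropWhile]
  have hq1 : q = PySem.Chars.rstrip q ++ (List.takeWhile PySem.Chars.isspace q.reverse).reverse := by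
    unfold PySem.Chars.rstrip
    rw [← List.reverse_append, List.takeWhile_append_dropWhile, List.reverse_reverse]
  have hstrip : PySem.Chars.strip p = PySem.Chars.rstrip q := by
    unfold PySem.Chars.strip; rw [hq]
  have hw1 : ∀ c ∈ List.takeWhile PySem.Chars.isspace p, PySem.Chars.isspace c = true :=
    fun c hc => List.mem_takeWhile_imp hc
  have hw2 : ∀ c ∈ (List.takeWhile PySem.Chars.isspace q.reverse).reverse,
      PySem.Chars.isspace c = true :=
    fun c hc => List.mem_takeWhile_imp (List.mem_reverse.mp hc)
  conv_rhs => rw [hp1]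
  rw [show PySem.Chars.lower (List.takeWhile PySem.Chars.isspace p ++ q) =
      PySem.Chars.lower (List.takeWhile PySem.Chars.isspace p) ++ PySem.Chars.lower q from
    List.map_append ..]
  rw [lower_of_allspace _ hw1, infix_space_left kw _ _ hw1 hk]
  conv_rhs => rw [hq1]
  rw [show PySem.Chars.lower (PySem.Chars.rstrip q ++
        (List.takeWhile PySem.Chars.isspace q.reverse).reverse) =
      PySem.Chars.lower (PySem.Chars.rstrip q) ++
        PySem.Chars.lower ((List.takeWhile PySem.Chars.isspace q.reverse).reverse) from
    List.map_append ..]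
  rw [lower_of_allspace _ hw2, infix_space_right kw _ _ hw2 hl, hstrip]

-- the concrete side conditions of the ten keywords
set_option maxRecDepth 4096 in
lemma kw_condsB : pigKeywords.all (fun kw => !kw.contains ',' &&
    kw.head?.all (fun c => !PySem.Chars.isspace c) &&
    kw.getLast?.all (fun c => !PySem.Chars.isspace c)) = true := by decide

lemma kw_conds : ∀ kw ∈ pigKeywords, (',' ∉ kw) ∧
    (∀ c ∈ kw.head?, PySem.Chars.isspace c = false) ∧
    (∀ c ∈ kw.getLast?, PySem.Chars.isspace c = false) := by
  intro kw hkw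
  have h := List.all_eq_true.mp kw_condsB kw hkw
  simp only [Bool.and_eq_true, Bool.not_eq_true', Option.all_eq_true, List.contains_eq_mem,
    decide_eq_false_iff_not] at h
  exact ⟨h.1.1, h.1.2, h.2⟩

lemma isIn_eq_of_iff {kw x y : List Char} (h : kw <:+: x ↔ kw <:+: y) :
    PySem.Chars.isIn kw x = PySem.Chars.isIn kw y := by
  rw [Bool.eq_iff_iff, PySem.Chars.isIn_iff_infix, PySem.Chars.isIn_iff_infix]
  exact h

lemma any_or {α : Type} (l : List α) (f g : α → Bool) :
    (l.any fun x => f x || g x) = (l.any f || l.any g) := by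
  rw [Bool.eq_iff_iff]
  simp only [List.any_eq_true, Bool.or_eq_true]
  constructor
  · rintro ⟨x, hx, h | h⟩
    exacts [Or.inl ⟨x, hx, h⟩, Or.inr ⟨x, hx, h⟩]
  · rintro (⟨x, hx, h⟩ | ⟨x, hx, h⟩)
    exacts [⟨x, hx, Or.inl h⟩, ⟨x, hx, Or.inr h⟩]

lemma chk_eq_chkW (p : List Char) : chk p = chkW p := by
  unfold chk chkW
  refine PySem.List.any_congr_mem (fun kw hkw => ?_)
  obtain ⟨_, h2, h3⟩ := kw_conds kw hkw
  exact isIn_eq_of_iff (infix_lower_strip kw p h2 h3)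

set_option maxRecDepth 8192 in
lemma lower_sep (pre rest : List Char) :
    PySem.Chars.lower (pre ++ ',' :: ' ' :: rest) =
      PySem.Chars.lower pre ++ ',' :: ' ' :: PySem.Chars.lower rest := by
  unfold PySem.Chars.lower
  rw [List.map_append, List.map_cons, List.map_cons,
    show PySem.Chars.lowerChar ',' = ',' from rfl, show PySem.Chars.lowerChar ' ' = ' ' from rfl]

set_option maxRecDepth 8192 in
lemma chkW_sep (pre rest : List Char) :
    chkW (pre ++ ',' :: ' ' :: rest) = (chkW pre || chkW rest) := by
  unfold chkW
  rw [← any_or]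
  refine PySem.List.any_congr_mem (fun kw hkw => ?_)
  obtain ⟨h1, h2, _⟩ := kw_conds kw hkw
  rw [Bool.eq_iff_iff]
  simp only [Bool.or_eq_true, PySem.Chars.isIn_iff_infix]
  rw [lower_sep, infix_append_comma kw _ _ h1,
    show (' ' :: PySem.Chars.lower rest) = [' '] ++ PySem.Chars.lower rest from rfl,
    infix_space_left kw [' '] _ (fun c hc => by rw [List.mem_singleton.mp hc]; decide) h2]

lemma main_split : ∀ (pre l : List Char), (mySplit pre l).any chk = chkW (pre ++ l) := by
  intro pre l
  induction pre, l using mySplit.induct with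
  | case1 pre rest ih =>
    rw [mySplit, List.any_cons, ih, List.nil_append, chk_eq_chkW, chkW_sep]
  | case2 pre c rest hne ih =>
    rw [mySplit_push pre c rest (by rintro ⟨t, ht⟩; cases ht; exact hne t rfl rfl), ih,
      List.append_assoc, List.singleton_append]
  | case3 pre => rw [mySplit, List.any_cons, List.any_nil, List.append_nil, chk_eq_chkW, Bool.or_false]

-- ===== VERDICT (by name: the statement is the Claim_ definition above) =====
theorem has_pig_spec : Claim_equal_has_pig := by
  intro s _
  show has_pig s = has_pig_alt s
  unfold has_pig has_pig_alt
  rw [splitOn_eq]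
  exact main_split [] s.toList
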